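-- pv_equiv track=rewrite | github.com/bug-breeder/tlmn_rl | src/tlmn/encoding.py | pairrun_start_len_from_index
-- ===== SOURCE A (Python) =====
-- from typing import List, Tuple, Dict, Optional, Set
--
-- PAIRRUN_BASE = 147
--
-- def pairrun_start_len_from_index(index:int) -> Tuple[int,int]:
--     rel = index - PAIRRUN_BASE
--     acc = 0
--     for L in range(2, 13):
--         n = (12 - L + 1)
--         if rel < acc + n:
--             start = rel - acc
--             return start, L
--         acc += n
--     raise ValueError("bad pairrun index")
-- ===== SOURCE B (Python) =====
-- PAIRRUN_BASE = 147
--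
-- def pairrun_start_len_from_index(index):
--     rel = index - PAIRRUN_BASE
--     if rel >= 66:
--         raise ValueError("bad pairrun index")
--     lo, hi = 0, 10
--     while lo < hi:
--         mid = (lo + hi + 1) // 2
--         if rel >= mid * (23 - mid) // 2:
--             lo = mid
--         else:
--             hi = mid - 1
--     return rel - lo * (23 - lo) // 2, lo + 2
-- ===== Notes on version B (the rewrite author's own statement) =====
-- stated objective: alternative
-- what changed: Replaces the linear cumulative-sum scan over run lengths with a binary search on the closed-form block boundaries k*(23-k)//2, with an up-front bounds check where A's loop falls through and raises.
import Mathlib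
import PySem

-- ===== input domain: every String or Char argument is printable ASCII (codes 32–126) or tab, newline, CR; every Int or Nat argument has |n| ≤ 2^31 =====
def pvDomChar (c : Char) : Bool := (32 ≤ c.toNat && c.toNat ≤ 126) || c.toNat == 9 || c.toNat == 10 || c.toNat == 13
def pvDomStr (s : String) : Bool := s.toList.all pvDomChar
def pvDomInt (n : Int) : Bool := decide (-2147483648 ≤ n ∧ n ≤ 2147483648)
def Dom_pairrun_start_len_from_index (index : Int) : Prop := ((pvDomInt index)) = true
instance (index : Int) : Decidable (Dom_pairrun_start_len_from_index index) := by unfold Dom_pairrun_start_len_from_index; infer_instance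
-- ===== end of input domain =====

-- B replaces A's linear cumulative-sum scan over run lengths by a binary search on the
-- closed-form block boundaries k*(23-k)//2 (objective: alternative, same exact results).

-- ===== PORT A =====
-- A's 'for L in range(2, 13)' loop with early return, as structural recursion over the
-- range list; acc is the running cumulative sum. The [] case is the loop falling
-- through, where A raises ValueError (excluded by Pre_); a dummy is returned there.
def pvLoopA (rel : Int) : Int → List Int → Int × Int
  | _, [] => (0, 0)
  | acc, L :: rest =>
    let n := 12 - L + 1
    if rel < acc + n then (rel - acc, L) else pvLoopA rel (acc + n) rest

def pairrun_start_len_from_index (index : Int) : Int × Int :=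
  let rel := index - 147
  pvLoopA rel 0 (PySem.List.pyRange 2 13 1)

-- ===== PORT B =====
-- Source B's 'while lo < hi' binary search; fuel 11 bounds the iterations (hi - lo ≤ 10,
-- so the fuel is never exhausted). lo, hi, mid take the same nonnegative values as in
-- Source B, so Nat arithmetic (including //2 on nonnegative values) is exact here.
def pvBS (rel : Int) : Nat → Nat → Nat → Nat
  | 0, lo, _ => lo
  | fuel + 1, lo, hi =>
    if lo < hi then
      let mid := (lo + hi + 1) / 2
      if rel ≥ ((mid * (23 - mid)) / 2 : Nat) then pvBS rel fuel mid hi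
      else pvBS rel fuel lo (mid - 1)
    else lo

def pairrun_start_len_from_index_alt (index : Int) : Int × Int :=
  let rel := index - 147
  if rel ≥ 66 then (0, 0)   -- Source B raises ValueError here; excluded by Pre_
  else
    let lo := pvBS rel 11 0 10
    (rel - ((lo * (23 - lo)) / 2 : Nat), (lo : Int) + 2)

-- ===== PRECONDITION & SPEC =====
-- Pre_ excludes exactly the inputs (index ≥ 213, i.e. rel ≥ 66) on which A raises ValueError.
def Pre_pairrun_start_len_from_index (index : Int) : Prop := index ≤ 212
instance (index : Int) : Decidable (Pre_pairrun_start_len_from_index index) := by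
  unfold Pre_pairrun_start_len_from_index; infer_instance

def pvWitness_pairrun_start_len_from_index : Int := (147)

def Spec_pairrun_start_len_from_index (index : Int) (out : Int × Int) : Prop := out = pairrun_start_len_from_index_alt index
instance (index : Int) (out : Int × Int) : Decidable (Spec_pairrun_start_len_from_index index out) := by unfold Spec_pairrun_start_len_from_index; infer_instance

-- ===== CLAIM (what is proved, stated in full; the proofs are below) =====
def Claim_equal_pairrun_start_len_from_index : Prop := ∀ (index : Int), Dom_pairrun_start_len_from_index index → Pre_pairrun_start_len_from_index index → Spec_pairrun_start_len_from_index index (pairrun_start_len_from_index index)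

-- ===== LEMMAS AND PROOFS =====

lemma pvRange_lit : PySem.List.pyRange 2 13 1 = [2,3,4,5,6,7,8,9,10,11,12] := by
  rw [PySem.List.pyRange_one]; decide

-- For rel < 11 (the first block, including every negative rel) A returns on its first
-- loop iteration and B's binary search descends to lo = 0; both give (rel, 2).
lemma pv_low (rel : Int) (hlow : rel < 11) :
    pvLoopA rel 0 [2,3,4,5,6,7,8,9,10,11,12] =
      ((rel - ((pvBS rel 11 0 10 * (23 - pvBS rel 11 0 10)) / 2 : Nat) : Int),
       ((pvBS rel 11 0 10 : Nat) : Int) + 2) := by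
  rw [pvBS]; rw [if_pos (by norm_num)]
  rw [if_neg (by norm_num; omega)]
  rw [pvBS]; rw [if_pos (by norm_num)]
  rw [if_neg (by norm_num; omega)]
  rw [pvBS]; rw [if_pos (by norm_num)]
  rw [if_neg (by norm_num; omega)]
  rw [pvBS]; rw [if_neg (by norm_num)]
  simp only [pvLoopA]
  rw [if_pos (by omega)]
  norm_num

-- The remaining 55 admitted inputs (11 ≤ rel < 66), checked by one kernel evaluation.
lemma pv_high : ∀ k : Fin 55, pvLoopA ((11:Int)+k.1) 0 [2,3,4,5,6,7,8,9,10,11,12] =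
    (((11:Int)+k.1 - ((pvBS ((11:Int)+k.1) 11 0 10 * (23 - pvBS ((11:Int)+k.1) 11 0 10)) / 2 : Nat) : Int),
     ((pvBS ((11:Int)+k.1) 11 0 10 : Nat) : Int) + 2) := by decide

-- ===== VERDICT (by name: the statement is the Claim_ definition above) =====
theorem pairrun_start_len_from_index_spec : Claim_equal_pairrun_start_len_from_index := by
  intro index _ hpre
  unfold Spec_pairrun_start_len_from_index
  unfold Pre_pairrun_start_len_from_index at hpre
  simp only [pairrun_start_len_from_index, pairrun_start_len_from_index_alt, pvRange_lit]
  rw [if_neg (by omega)]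
  by_cases hlow : index - 147 < 11
  · exact pv_low _ hlow
  · have hk : index - 147 = (11:Int) + ((index - 147 - 11).toNat : Int) := by omega
    rw [hk]
    exact pv_high ⟨(index - 147 - 11).toNat, by omega⟩
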